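-- pv_equiv track=rewrite | github.com/lizi12/PythonCourse | hw1_question2.py | pali_check_middle
-- ===== SOURCE A (Python) =====
-- def pali_check_middle(num,dig_num):
--     """
--    Get a number and number of digits.
--    Return if the middle number of digit of this number is a palindrome.
--
--    """
--     div_num1 =  10**(dig_num+1)
--     div_num2 = 10
--     first_digits = (num // div_num1) * div_num1
--     num = (num - first_digits)//10
--     temp=num
--     rev=0
--     while(num>0):
--         dig=num%10
--         rev=rev*10+dig
--         num=num//10
--     hezka = 10**(dig_num-1)
--     s_con = temp//hezka
--     if(temp==rev) and (s_con>0 or temp==0):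
--         return True
--     else:
--         return False
-- ===== SOURCE B (Python) =====
-- def pali_check_middle(num, dig_num):
--     """Positional two-pointer check: extract the middle number m, reject a
--     wrong digit count by a power-of-ten range test, then compare symmetric
--     digits of m directly by exponent (no reversal, no digit container)."""
--     m = num % 10 ** (dig_num + 1) // 10
--     if m == 0:
--         return True
--     if not 10 ** (dig_num - 1) <= m < 10 ** dig_num:
--         return False
--     for i in range(dig_num // 2):
--         if m // 10 ** i % 10 != m // 10 ** (dig_num - 1 - i) % 10:
--             return False
--     return True
-- ===== Notes on version B (the rewrite author's own statement) =====
-- stated objective: alternative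
-- what changed: B replaces A's arithmetic reversal (rev = rev*10 + dig) plus quotient guard by a positional two-pointer scheme: a power-of-ten range test rejects a wrong digit count up front, then symmetric digits m//10**i%10 and m//10**(dig_num-1-i)%10 are compared directly over the half range, building no reversed number at all.
-- outside the precondition, e.g. on pali_check_middle(1000000000, -15): A returns False, B returns True
import Mathlib
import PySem

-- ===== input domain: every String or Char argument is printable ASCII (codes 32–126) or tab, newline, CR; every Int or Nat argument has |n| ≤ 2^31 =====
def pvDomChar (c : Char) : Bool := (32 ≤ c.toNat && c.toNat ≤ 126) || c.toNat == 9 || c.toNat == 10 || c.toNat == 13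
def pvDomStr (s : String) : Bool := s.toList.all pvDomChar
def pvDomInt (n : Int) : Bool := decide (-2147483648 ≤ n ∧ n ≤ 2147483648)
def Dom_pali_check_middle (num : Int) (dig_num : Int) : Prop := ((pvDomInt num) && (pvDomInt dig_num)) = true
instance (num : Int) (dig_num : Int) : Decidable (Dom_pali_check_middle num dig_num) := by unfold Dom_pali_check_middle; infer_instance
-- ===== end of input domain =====

-- B drops A's arithmetic integer reversal entirely: it rejects a wrong digit count with a
-- power-of-ten range test and then compares symmetric digits of the middle number positionally
-- (m // 10^i % 10 against m // 10^(dig_num-1-i) % 10) over the half range; proved equal on Pre_.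

-- ===== PORT A =====
-- the 'while(num>0)' integer-reversal loop of A
def pvRevLoop (num rev : Int) : Int :=
  if num > 0 then
    pvRevLoop (PySem.Int.floordiv num 10) (rev * 10 + PySem.Int.mod num 10)
  else rev
termination_by num.toNat
decreasing_by
  have h : PySem.Int.floordiv num 10 = num / 10 := PySem.Int.floordiv_eq_ediv_of_pos (by omega)
  rw [h]; omega

-- exponents are ported via .toNat: on Pre_ (dig_num ≥ -1) the exponent dig_num+1 is ≥ 0, so
-- 10^(dig_num+1) is exact; Python's 10**(dig_num-1) is a float for dig_num ∈ {-1,0}, but there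
-- temp = 0 and the returned value (True) coincides with this port's.
def pali_check_middle (num : Int) (dig_num : Int) : Bool :=
  let div_num1 : Int := 10 ^ (dig_num + 1).toNat
  let first_digits := (PySem.Int.floordiv num div_num1) * div_num1
  let num1 := PySem.Int.floordiv (num - first_digits) 10
  let temp := num1
  let rev := pvRevLoop num1 0
  let hezka : Int := 10 ^ (dig_num - 1).toNat
  let s_con := PySem.Int.floordiv temp hezka
  if temp = rev ∧ (s_con > 0 ∨ temp = 0) then true else false

-- ===== PORT B =====
-- exponents via .toNat: the branches using dig_num-1 and dig_num are reached only when m ≠ 0,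
-- which under Pre_ forces dig_num ≥ 1, so all exponents reached are ≥ 0 and exact.
def pali_check_middle_alt (num : Int) (dig_num : Int) : Bool :=
  let m := PySem.Int.floordiv (PySem.Int.mod num (10 ^ (dig_num + 1).toNat)) 10
  if m = 0 then true
  else if ¬ (10 ^ (dig_num - 1).toNat ≤ m ∧ m < 10 ^ dig_num.toNat) then false
  else
    (PySem.List.pyRange 0 (PySem.Int.floordiv dig_num 2) 1).all
      (fun i => decide (PySem.Int.mod (PySem.Int.floordiv m (10 ^ i.toNat)) 10
        = PySem.Int.mod (PySem.Int.floordiv m (10 ^ (dig_num - 1 - i).toNat)) 10))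

-- ===== PRECONDITION & SPEC =====
-- Pre_ excludes dig_num ≤ -2: there Python evaluates 10**(dig_num+1) as a float, so A's returned
-- Boolean depends on float floor-division rounding, which an integer port cannot reproduce.
def Pre_pali_check_middle (num : Int) (dig_num : Int) : Prop := -1 ≤ dig_num
instance (num : Int) (dig_num : Int) : Decidable (Pre_pali_check_middle num dig_num) := by
  unfold Pre_pali_check_middle; infer_instance

def pvWitness_pali_check_middle : Int × Int := (12321, 3)

def Spec_pali_check_middle (num : Int) (dig_num : Int) (out : Bool) : Prop := out = pali_check_middle_alt num dig_num
instance (num : Int) (dig_num : Int) (out : Bool) : Decidable (Spec_pali_check_middle num dig_num out) := by unfold Spec_pali_check_middle; infer_instance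

-- ===== CLAIM (what is proved, stated in full; the proofs are below) =====
def Claim_equal_pali_check_middle : Prop := ∀ (num : Int) (dig_num : Int), Dom_pali_check_middle num dig_num → Pre_pali_check_middle num dig_num → Spec_pali_check_middle num dig_num (pali_check_middle num dig_num)

-- ===== LEMMAS AND PROOFS =====

theorem pvRevLoop_natCast (n : Nat) : ∀ (r : Int),
    pvRevLoop (n : Int) r
      = r * 10 ^ (Nat.digits 10 n).length + ((Nat.ofDigits 10 (Nat.digits 10 n).reverse : Nat) : Int) := by
  induction n using Nat.strong_induction_on with
  | _ n ih =>
    intro r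
    rw [pvRevLoop]
    by_cases h : 0 < n
    · have h10 : PySem.Int.floordiv (n:Int) 10 = ((n/10 : Nat) : Int) := by
        exact_mod_cast PySem.Int.floordiv_natCast n 10
      have hm : PySem.Int.mod (n:Int) 10 = ((n%10 : Nat) : Int) := by
        exact_mod_cast PySem.Int.mod_natCast n 10
      rw [if_pos (by exact_mod_cast h), h10, hm, ih (n/10) (Nat.div_lt_self h (by norm_num))]
      rw [Nat.digits_def' (by norm_num : 1 < 10) h]
      simp only [List.length_cons, List.reverse_cons, Nat.ofDigits_append]
      push_cast
      ring_nf
      simp [Nat.ofDigits]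
      ring
    · rw [if_neg (by omega)]
      have : n = 0 := by omega
      simp [this]

theorem pali_core (n : Nat) :
    (n = Nat.ofDigits 10 (Nat.digits 10 n).reverse) ↔ Nat.digits 10 n = (Nat.digits 10 n).reverse := by
  constructor
  · intro hrev
    by_cases h0 : n = 0
    · simp [h0]
    have hds : Nat.digits 10 n ≠ [] := Nat.digits_ne_nil_iff_ne_zero.mpr h0
    have hpos : 0 < n := Nat.pos_of_ne_zero h0
    by_cases hmod : n % 10 = 0
    · exfalso
      have hdef : Nat.digits 10 n = n % 10 :: Nat.digits 10 (n / 10) :=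
        Nat.digits_def' (by norm_num) hpos
      have hlen : (Nat.digits 10 n).length = (Nat.digits 10 (n / 10)).length + 1 := by
        rw [hdef]; simp
      have hrev2 : Nat.ofDigits 10 (Nat.digits 10 n).reverse
          = Nat.ofDigits 10 (Nat.digits 10 (n / 10)).reverse := by
        rw [hdef, hmod]
        rw [List.reverse_cons, Nat.ofDigits_append]
        simp [Nat.ofDigits]
      have hlt : Nat.ofDigits 10 (Nat.digits 10 (n / 10)).reverse
          < 10 ^ (Nat.digits 10 (n / 10)).length := by
        have := Nat.ofDigits_lt_base_pow_length (b := 10) (l := (Nat.digits 10 (n / 10)).reverse)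
          (by norm_num) (fun x hx => Nat.digits_lt_base (by norm_num) (List.mem_reverse.mp hx))
        simpa using this
      have hge : 10 ^ (Nat.digits 10 n).length ≤ 10 * n :=
        Nat.base_pow_length_digits_le 10 n (by norm_num) h0
      rw [hlen, pow_succ] at hge
      have : 10 ^ (Nat.digits 10 (n / 10)).length ≤ n := by omega
      omega
    · have hlast : ∀ (h : (Nat.digits 10 n).reverse ≠ []),
          ((Nat.digits 10 n).reverse).getLast h ≠ 0 := by
        intro h
        rw [List.getLast_reverse]
        simp only [Nat.digits_def' (by norm_num : (1:Nat) < 10) hpos, List.head_cons]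
        exact hmod
      have := Nat.digits_ofDigits 10 (by norm_num) (Nat.digits 10 n).reverse
        (fun x hx => Nat.digits_lt_base (by norm_num) (List.mem_reverse.mp hx)) hlast
      rw [← hrev] at this
      exact this
  · intro hp
    conv_lhs => rw [← Nat.ofDigits_digits 10 n]
    rw [← hp]

-- a list equals its reverse iff the first half matches the mirrored positions
theorem half_palindrome (l : List Nat) :
    (∀ j, j < l.length / 2 → l.getD j 0 = l.getD (l.length - 1 - j) 0) ↔ l = l.reverse := by
  constructor
  · intro h
    apply List.ext_getElem?
    intro j
    by_cases hj : j < l.length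
    · rw [List.getElem?_reverse hj]
      have key : ∀ k, k < l.length → l.getD k 0 = l.getD (l.length - 1 - k) 0 := by
        intro k hk
        rcases lt_trichotomy k (l.length - 1 - k) with hlt | heq | hgt
        · exact h k (by omega)
        · rw [heq]; congr 1; omega
        · have := h (l.length - 1 - k) (by omega)
          rw [this]
          congr 1
          omega
      have := key j hj
      rw [List.getD_eq_getElem?_getD, List.getD_eq_getElem?_getD,
        List.getElem?_eq_getElem hj, List.getElem?_eq_getElem (by omega : l.length - 1 - j < l.length)] at this
      simp only [Option.getD_some] at this
      rw [List.getElem?_eq_getElem hj, List.getElem?_eq_getElem (by omega : l.length - 1 - j < l.length), this]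
    · rw [List.getElem?_eq_none (by omega), List.getElem?_eq_none (by simp; omega)]
  · intro h j hj
    have hthis : l[j]? = l.reverse[j]? := by rw [← h]
    rw [List.getElem?_reverse (by omega : j < l.length)] at hthis
    rw [List.getD_eq_getElem?_getD, List.getD_eq_getElem?_getD, hthis]

theorem pali_check_middle_eq (num : Int) (dig_num : Int) (hpre : -1 ≤ dig_num) :
    pali_check_middle num dig_num = pali_check_middle_alt num dig_num := by
  unfold pali_check_middle pali_check_middle_alt
  dsimp only
  set M : Int := 10 ^ (dig_num + 1).toNat with hM
  have hMpos : 0 < M := by positivity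
  have hsub : num - PySem.Int.floordiv num M * M = PySem.Int.mod num M := by
    have := PySem.Int.floordiv_mul_add_mod num M
    omega
  rw [hsub]
  set m : Int := PySem.Int.floordiv (PySem.Int.mod num M) 10 with hm
  have hm0 : 0 ≤ m := by
    rw [hm, PySem.Int.floordiv_eq_ediv_of_pos (by omega)]
    exact Int.ediv_nonneg (PySem.Int.mod_nonneg _ hMpos) (by omega)
  obtain ⟨n, hn⟩ : ∃ n : Nat, m = (n : Int) := ⟨m.toNat, (Int.toNat_of_nonneg hm0).symm⟩
  have hmlt : m < (10 : Int) ^ dig_num.toNat := by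
    rw [hm, PySem.Int.floordiv_lt_iff_lt_mul (by omega : (0:Int) < 10)]
    calc PySem.Int.mod num M < M := PySem.Int.mod_lt _ hMpos
    _ ≤ 10 ^ dig_num.toNat * 10 := by
        rw [hM]
        by_cases hd : 0 ≤ dig_num
        · have he : (dig_num + 1).toNat = dig_num.toNat + 1 := by omega
          rw [he, pow_succ]
        · have h1 : dig_num = -1 := by omega
          simp [h1]
  have hnlt : n < 10 ^ dig_num.toNat := by
    rw [hn] at hmlt; exact_mod_cast hmlt
  set ds := Nat.digits 10 n with hds
  have hrev : pvRevLoop m 0 = ((Nat.ofDigits 10 ds.reverse : Nat) : Int) := by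
    rw [hn, pvRevLoop_natCast n 0]; ring
  rw [hrev]
  by_cases hz : n = 0
  · -- m = 0: A's condition holds trivially, B returns true in its first branch
    subst hz
    simp only [Nat.cast_zero] at hn
    rw [if_pos (by rw [hn]; simp [hds]), if_pos hn]
  · have hnpos : 0 < n := Nat.pos_of_ne_zero hz
    have hmne : m ≠ 0 := by rw [hn]; exact_mod_cast hz
    have hd1 : 1 ≤ dig_num := by
      by_contra hlt
      have : dig_num.toNat = 0 := by omega
      rw [this] at hnlt; omega
    have hdne : ds ≠ [] := by rw [hds]; exact Nat.digits_ne_nil_iff_ne_zero.mpr hz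
    rw [if_neg hmne]
    -- A's Boolean condition, digit-list form
    have hc1 : (m = ((Nat.ofDigits 10 ds.reverse : Nat) : Int)) ↔ ds = ds.reverse := by
      rw [hn, Nat.cast_inj]
      exact pali_core n
    have hlenle : ds.length ≤ dig_num.toNat :=
      (Nat.digits_length_le_iff (by norm_num) n).mpr hnlt
    have hezka : ((10 : Int) ^ (dig_num - 1).toNat) = ((10 ^ (dig_num.toNat - 1) : Nat) : Int) := by
      have : (dig_num - 1).toNat = dig_num.toNat - 1 := by omega
      rw [this]; push_cast; ring
    have hiffl := Nat.digits_length_le_iff (b := 10) (k := dig_num.toNat - 1) (by norm_num) n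
    have hlone : 1 ≤ ds.length := by
      cases hcs : ds with
      | nil => exact absurd hcs hdne
      | cons a l => simp
    have hlencar : 10 ^ (dig_num.toNat - 1) ≤ n ↔ ds.length = dig_num.toNat := by
      rw [hds] at *
      constructor
      · intro hle
        have hnot : ¬ ((Nat.digits 10 n).length ≤ dig_num.toNat - 1) := fun hl => by
          have := hiffl.mp hl; omega
        omega
      · intro hlen
        by_contra hlt2
        have := hiffl.mpr (by omega : n < 10 ^ (dig_num.toNat - 1))
        omega
    have hscon : PySem.Int.floordiv m (10 ^ (dig_num - 1).toNat) > 0 ↔ ds.length = dig_num.toNat := by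
      rw [show (PySem.Int.floordiv m (10 ^ (dig_num - 1).toNat) > 0) ↔
          (1 ≤ PySem.Int.floordiv m (10 ^ (dig_num - 1).toNat)) from by omega]
      rw [PySem.Int.le_floordiv_iff_mul_le (by positivity)]
      rw [one_mul, hezka, hn]
      rw [show (((10 ^ (dig_num.toNat - 1) : Nat) : Int) ≤ (n : Int)) ↔ 10 ^ (dig_num.toNat - 1) ≤ n
        from by exact_mod_cast Iff.rfl]
      exact hlencar
    -- B's range test ↔ the digit count is right
    have hrange : (10 ^ (dig_num - 1).toNat ≤ m ∧ m < 10 ^ dig_num.toNat) ↔ ds.length = dig_num.toNat := by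
      constructor
      · rintro ⟨hle, _⟩
        apply hlencar.mp
        rw [hezka, hn] at hle
        exact_mod_cast hle
      · intro hlen
        refine ⟨?_, hmlt⟩
        rw [hezka, hn]
        exact_mod_cast hlencar.mpr hlen
    by_cases hlen : ds.length = dig_num.toNat
    · rw [if_neg (not_not_intro (hrange.mpr hlen))]
      -- both sides reduce to the palindrome test; B's via the half scan
      have hfd : PySem.Int.floordiv dig_num 2 = ((dig_num.toNat / 2 : Nat) : Int) := by
        rw [show dig_num = ((dig_num.toNat : Nat) : Int) from by omega]
        exact_mod_cast PySem.Int.floordiv_natCast dig_num.toNat 2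
      have hdig : ∀ j : Nat, j ≤ dig_num.toNat →
          PySem.Int.mod (PySem.Int.floordiv m (10 ^ j)) 10 = ((ds.getD j 0 : Nat) : Int) := by
        intro j hj
        rw [hn]
        have h1 : PySem.Int.floordiv (n : Int) ((10:Int) ^ j) = ((n / 10 ^ j : Nat) : Int) := by
          exact_mod_cast PySem.Int.floordiv_natCast n (10 ^ j)
        rw [h1]
        have h2 : PySem.Int.mod ((n / 10 ^ j : Nat) : Int) 10 = ((n / 10 ^ j % 10 : Nat) : Int) := by
          exact_mod_cast PySem.Int.mod_natCast (n / 10 ^ j) 10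
        rw [h2, hds, Nat.getD_digits n j (by norm_num)]
      have hall : (((PySem.List.pyRange 0 (PySem.Int.floordiv dig_num 2) 1).all
          (fun i => decide (PySem.Int.mod (PySem.Int.floordiv m (10 ^ i.toNat)) 10
            = PySem.Int.mod (PySem.Int.floordiv m (10 ^ (dig_num - 1 - i).toNat)) 10))) = true)
          ↔ ds = ds.reverse := by
        rw [hfd, PySem.List.pyRange_zero_natCast]
        rw [← half_palindrome ds]
        simp only [List.all_map, List.all_eq_true, List.mem_range, Function.comp,
          decide_eq_true_eq]
        constructor
        · intro h j hj
          rw [hlen] at hj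
          have := h j hj
          rw [Int.toNat_natCast] at this
          rw [show (dig_num - 1 - (j : Int)).toNat = dig_num.toNat - 1 - j from by omega] at this
          rw [hdig j (by omega), hdig (dig_num.toNat - 1 - j) (by omega)] at this
          rw [hlen]
          exact_mod_cast this
        · intro h j hj
          rw [Int.toNat_natCast,
            show (dig_num - 1 - (j : Int)).toNat = dig_num.toNat - 1 - j from by omega,
            hdig j (by omega), hdig (dig_num.toNat - 1 - j) (by omega)]
          have := h j (by omega)
          rw [hlen] at this
          exact_mod_cast this
      by_cases hp : ds = ds.reverse
      · rw [if_pos ⟨hc1.mpr hp, Or.inl (hscon.mpr hlen)⟩, hall.mpr hp]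
      · rw [if_neg (fun hh => hp (hc1.mp hh.1))]
        exact (Bool.eq_false_iff.mpr (fun hh => hp (hall.mp hh))).symm
    · rw [if_neg (fun hh => by
        rcases hh.2 with h | h
        · exact hlen (hscon.mp h)
        · exact hmne h)]
      rw [if_pos (fun hr => hlen (hrange.mp hr))]

-- ===== VERDICT (by name: the statement is the Claim_ definition above) =====
theorem pali_check_middle_spec : Claim_equal_pali_check_middle := by
  intro num dig_num _ hpre
  unfold Pre_pali_check_middle at hpre
  unfold Spec_pali_check_middle
  exact pali_check_middle_eq num dig_num hpre
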